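-- pv_equiv track=rewrite | github.com/minh-quann/BMTTNC-HUTECH-2180604127 | LAB01/exnc/exnc_02.py | tinh_tong
-- ===== SOURCE A (Python) =====
-- def tinh_tong(chuoi):
--   tong_so_duong = 0
--   tong_so_am = 0
--   for so in chuoi.split():
--     try:
--       so_nguyen = int(so)
--       if so_nguyen > 0:
--         tong_so_duong += so_nguyen
--       else:
--         tong_so_am += so_nguyen
--     except ValueError:
--       pass
--   return tong_so_duong, tong_so_am
-- ===== SOURCE B (Python) =====
-- def tinh_tong(chuoi):
--     so_list = []
--     for so in chuoi.split():
--         try: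
--             so_list.append(int(so))
--         except ValueError:
--             pass
--     tong_so_duong = sum(n for n in so_list if n > 0)
--     tong_so_am = sum(n for n in so_list if n <= 0)
--     return tong_so_duong, tong_so_am
-- ===== Notes on version B (the rewrite author's own statement) =====
-- stated objective: simpler
-- what changed: Instead of one loop branching into two running accumulators, B first collects all parsed ints into a list (keeping try/except to match A's acceptance set), then computes the pair by two filtered sum() aggregations (n > 0 vs n <= 0).
import Mathlib
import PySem

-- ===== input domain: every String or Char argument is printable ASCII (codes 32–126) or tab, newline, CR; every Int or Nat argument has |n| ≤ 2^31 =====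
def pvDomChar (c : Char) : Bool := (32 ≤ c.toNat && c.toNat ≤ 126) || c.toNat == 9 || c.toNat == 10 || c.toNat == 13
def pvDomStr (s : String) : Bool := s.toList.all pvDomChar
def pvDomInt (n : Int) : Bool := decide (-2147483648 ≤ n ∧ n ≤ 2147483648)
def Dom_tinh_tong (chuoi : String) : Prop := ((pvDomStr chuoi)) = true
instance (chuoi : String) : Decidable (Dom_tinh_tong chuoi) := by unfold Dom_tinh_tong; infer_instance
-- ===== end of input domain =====

-- B collects all parsed ints first, then computes the pair with two filtered sums (simpler decomposition).


-- ===== PORT A =====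
def tinh_tong (chuoi : String) : Int × Int :=
  (PySem.Str.split₀ chuoi).foldl
    (fun (acc : Int × Int) so =>
      match PySem.Int.ofStr? so with
      | some so_nguyen =>
          if so_nguyen > 0 then (acc.1 + so_nguyen, acc.2) else (acc.1, acc.2 + so_nguyen)
      | none => acc)
    (0, 0)

-- ===== PORT B =====
def tinh_tong_alt (chuoi : String) : Int × Int :=
  let so_list := (PySem.Str.split₀ chuoi).filterMap PySem.Int.ofStr?
  ((so_list.filter (fun n => n > 0)).sum, (so_list.filter (fun n => n ≤ 0)).sum)

-- ===== PRECONDITION & SPEC =====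
def Spec_tinh_tong (chuoi : String) (out : Int × Int) : Prop := out = tinh_tong_alt chuoi
instance (chuoi : String) (out : Int × Int) : Decidable (Spec_tinh_tong chuoi out) := by unfold Spec_tinh_tong; infer_instance

-- ===== CLAIM (what is proved, stated in full; the proofs are below) =====
def Claim_equal_tinh_tong : Prop := ∀ (chuoi : String), Dom_tinh_tong chuoi → Spec_tinh_tong chuoi (tinh_tong chuoi)

-- ===== LEMMAS AND PROOFS =====
theorem tinh_tong_foldl_eq (toks : List String) (p q : Int) :
    toks.foldl
      (fun (acc : Int × Int) so =>
        match PySem.Int.ofStr? so with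
        | some so_nguyen =>
            if so_nguyen > 0 then (acc.1 + so_nguyen, acc.2) else (acc.1, acc.2 + so_nguyen)
        | none => acc)
      (p, q)
    = (p + ((toks.filterMap PySem.Int.ofStr?).filter (fun n => n > 0)).sum,
       q + ((toks.filterMap PySem.Int.ofStr?).filter (fun n => n ≤ 0)).sum) := by
  induction toks generalizing p q with
  | nil => simp
  | cons t ts ih =>
      simp only [List.foldl_cons, List.filterMap_cons]
      cases h : PySem.Int.ofStr? t with
      | none => simp [ih]
      | some n =>
          by_cases hn : n > 0
          · simp [hn, ih, add_assoc, not_le.mpr hn]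
          · simp [hn, ih, add_assoc, not_lt.mp hn]

-- ===== VERDICT (by name: the statement is the Claim_ definition above) =====
theorem tinh_tong_spec : Claim_equal_tinh_tong := by
  intro chuoi _
  show tinh_tong chuoi = tinh_tong_alt chuoi
  simp [tinh_tong, tinh_tong_alt, tinh_tong_foldl_eq]
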